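-- pv_equiv track=rewrite | github.com/nifemiEatsBlocks/multi-cipher-Encryption-tool | beaufort.py | beaufort_cipher
-- ===== SOURCE A (Python) =====
-- def beaufort_cipher(text, key):
--     alphabet = "ABCDEFGHIJKLMNOPQRSTUVWXYZ"
--     text = text.upper()
--     key = key.upper()
--
--     result = ""
--     key_index = 0
--
--     for char in text:
--         if char.isalpha():
--             p_val = alphabet.index(char)
--
--             k_char = key[key_index % len(key)]
--             k_val = alphabet.index(k_char)
--
--             c_val = (k_val - p_val) % 26
--
--             result += alphabet[c_val]
--             key_index += 1
--         else:
--             result += char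
--
--     return result
-- ===== SOURCE B (Python) =====
-- def beaufort_cipher(text, key):
--     alphabet = "ABCDEFGHIJKLMNOPQRSTUVWXYZ"
--     t = text.upper()
--     k = key.upper()
--     letters = [c for c in t if c.isalpha()]
--     encrypted = [alphabet[(alphabet.index(k[i % len(k)]) - alphabet.index(c)) % 26]
--                  for i, c in enumerate(letters)]
--     it = iter(encrypted)
--     return "".join(next(it) if c.isalpha() else c for c in t)
-- ===== Notes on version B (the rewrite author's own statement) =====
-- stated objective: alternative
-- what changed: A's single stateful loop threading a key_index counter is replaced by a filter-encrypt-merge decomposition: collect the alphabetic characters, encrypt that list positionally via enumerate, then a second pass over the text splices the encrypted letters back via an iterator.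
import Mathlib
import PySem

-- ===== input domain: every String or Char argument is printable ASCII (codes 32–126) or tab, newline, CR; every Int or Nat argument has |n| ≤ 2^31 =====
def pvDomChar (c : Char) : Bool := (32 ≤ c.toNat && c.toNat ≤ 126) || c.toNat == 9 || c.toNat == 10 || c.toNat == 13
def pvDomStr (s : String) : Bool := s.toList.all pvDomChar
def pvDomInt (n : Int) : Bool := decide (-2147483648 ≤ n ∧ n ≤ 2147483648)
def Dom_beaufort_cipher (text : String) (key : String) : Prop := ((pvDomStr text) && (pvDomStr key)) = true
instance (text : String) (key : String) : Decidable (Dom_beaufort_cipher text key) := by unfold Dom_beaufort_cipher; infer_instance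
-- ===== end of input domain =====

-- B replaces A's single stateful loop (key_index counter) by a filter-encrypt-merge decomposition
-- (alternative structure, same cost); return values agree on all of Pre_.

-- ===== PORT A =====
-- A-side helpers: index into the alphabet (alphabet.index raises only off Pre_, getD 0 is the total stand-in)
def pvIdxA (c : Char) : Nat :=
  (PySem.List.index? "ABCDEFGHIJKLMNOPQRSTUVWXYZ".toList c).getD 0

-- the for-loop of A: state = (remaining chars, key_index); result built by cons
def pvALoop (ku : List Char) : List Char → Int → List Char
  | [], _ => []
  | c :: cs, ki =>
    if PySem.Chars.isalpha c then
      let p_val : Nat := pvIdxA c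
      let k_char : Char := (PySem.List.pyGet? ku (PySem.Int.mod ki (ku.length : Int))).getD 'A'
      let k_val : Nat := pvIdxA k_char
      let c_val : Int := PySem.Int.mod ((k_val : Int) - (p_val : Int)) 26
      (PySem.List.pyGet? "ABCDEFGHIJKLMNOPQRSTUVWXYZ".toList c_val).getD 'A' :: pvALoop ku cs (ki + 1)
    else
      c :: pvALoop ku cs ki

def beaufort_cipher (text : String) (key : String) : String :=
  let t := PySem.Chars.upper text.toList
  let ku := PySem.Chars.upper key.toList
  String.ofList (pvALoop ku t 0)

-- ===== PORT B =====
def pvIdxB (c : Char) : Nat :=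
  (PySem.List.index? "ABCDEFGHIJKLMNOPQRSTUVWXYZ".toList c).getD 0

-- one letter of the encryption comprehension: position i, plaintext letter c
def pvEncB (ku : List Char) (i : Int) (c : Char) : Char :=
  (PySem.List.pyGet? "ABCDEFGHIJKLMNOPQRSTUVWXYZ".toList
      (PySem.Int.mod ((pvIdxB ((PySem.List.pyGet? ku (PySem.Int.mod i (ku.length : Int))).getD 'A') : Int)
                        - (pvIdxB c : Int)) 26)).getD 'A'

-- the final join: splice the encrypted letters (the iterator) back into the text
def pvMerge : List Char → List Char → List Char
  | [], _ => []
  | c :: cs, es =>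
    if PySem.Chars.isalpha c then
      match es with
      | e :: es' => e :: pvMerge cs es'
      | [] => pvMerge cs []   -- next(it) on an exhausted iterator: unreachable (letter counts match)
    else
      c :: pvMerge cs es

def beaufort_cipher_alt (text : String) (key : String) : String :=
  let t := PySem.Chars.upper text.toList
  let ku := PySem.Chars.upper key.toList
  let letters := t.filter PySem.Chars.isalpha
  let encrypted := (PySem.List.enumerate letters).map (fun p => pvEncB ku p.1 p.2)
  String.ofList (pvMerge t encrypted)

-- ===== PRECONDITION & SPEC =====
-- Pre_ excludes exactly the inputs where Python A raises: a ZeroDivisionError (empty key while the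
-- text contains a letter) or a ValueError from alphabet.index on a non-alphabetic used key character.
def Pre_beaufort_cipher (text : String) (key : String) : Prop :=
  (let L := text.toList.countP PySem.Chars.isalpha
   (L == 0) || (!key.toList.isEmpty && (key.toList.take (min L key.toList.length)).all PySem.Chars.isalpha)) = true
instance (text : String) (key : String) : Decidable (Pre_beaufort_cipher text key) := by
  unfold Pre_beaufort_cipher; infer_instance

def pvWitness_beaufort_cipher : String × String := ("Hello, World!", "Key")

def Spec_beaufort_cipher (text : String) (key : String) (out : String) : Prop := out = beaufort_cipher_alt text key
instance (text : String) (key : String) (out : String) : Decidable (Spec_beaufort_cipher text key out) := by unfold Spec_beaufort_cipher; infer_instance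

-- ===== CLAIM (what is proved, stated in full; the proofs are below) =====
def Claim_equal_beaufort_cipher : Prop := ∀ (text : String) (key : String), Dom_beaufort_cipher text key → Pre_beaufort_cipher text key → Spec_beaufort_cipher text key (beaufort_cipher text key)

-- ===== LEMMAS AND PROOFS =====

-- the two per-letter encodings are the same function
theorem pvEnc_eq (ku : List Char) (i : Int) (c : Char) :
    pvEncB ku i c =
      (PySem.List.pyGet? "ABCDEFGHIJKLMNOPQRSTUVWXYZ".toList
        (PySem.Int.mod ((pvIdxA ((PySem.List.pyGet? ku (PySem.Int.mod i (ku.length : Int))).getD 'A') : Int)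
                          - (pvIdxA c : Int)) 26)).getD 'A' := by
  simp [pvEncB, pvIdxA, pvIdxB]

-- the core invariant: A's loop from key_index k = merging the text with the letters encrypted from position k
theorem pvALoop_eq_merge (ku : List Char) (cs : List Char) (k : Int) :
    pvALoop ku cs k =
      pvMerge cs ((PySem.List.enumerate (cs.filter PySem.Chars.isalpha) k).map (fun p => pvEncB ku p.1 p.2)) := by
  induction cs generalizing k with
  | nil => simp [pvALoop, pvMerge]
  | cons c cs ih =>
    by_cases h : PySem.Chars.isalpha c
    · simp [pvALoop, pvMerge, h, pvEnc_eq, ih (k + 1)]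
    · simp [pvALoop, pvMerge, h, ih k]

-- ===== VERDICT (by name: the statement is the Claim_ definition above) =====
theorem beaufort_cipher_spec : Claim_equal_beaufort_cipher := by
  intro text key _ _
  unfold Spec_beaufort_cipher beaufort_cipher beaufort_cipher_alt
  simp [pvALoop_eq_merge]
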